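-- pv_equiv track=rewrite | github.com/shirruso/digitalHumanities | getOccupations.py | get_sub_occupations
-- ===== SOURCE A (Python) =====
-- def get_sub_occupations(occupation):
--     new_occupation = []
--     professions_suffix = ['er', 'or', 'ist', 'ian', 'ant', 'man', 'ee']
--     occupation_arr = occupation.split(' ')
--     for suffix in professions_suffix:
--         for sub_occ in occupation_arr:
--             if sub_occ.endswith(suffix):
--                 new_occupation.append(sub_occ.lower())
--     return new_occupation
-- ===== SOURCE B (Python) =====
-- def get_sub_occupations(occupation):
--     # precompute (word, lowered) pairs once; then recurse over the suffix list,
--     # each level appending that suffix's matches (recursive decomposition vs A's nested loops)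
--     pairs = [(w, w.lower()) for w in occupation.split(' ')]
--
--     def matches(suffix, ps):
--         if not ps:
--             return []
--         (w, low) = ps[0]
--         head = [low] if w.endswith(suffix) else []
--         return head + matches(suffix, ps[1:])
--
--     def go(ss):
--         if not ss:
--             return []
--         return matches(ss[0], pairs) + go(ss[1:])
--
--     return go(['er', 'or', 'ist', 'ian', 'ant', 'man', 'ee'])
-- ===== Notes on version B (the rewrite author's own statement) =====
-- stated objective: alternative
-- what changed: B precomputes (word, lowercased) pairs in one pass and then builds the result by structural recursion over the suffix list (a recursive matches helper per suffix, concatenated level by level), instead of A's iterative nested for-loops appending to one accumulator.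
import Mathlib
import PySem

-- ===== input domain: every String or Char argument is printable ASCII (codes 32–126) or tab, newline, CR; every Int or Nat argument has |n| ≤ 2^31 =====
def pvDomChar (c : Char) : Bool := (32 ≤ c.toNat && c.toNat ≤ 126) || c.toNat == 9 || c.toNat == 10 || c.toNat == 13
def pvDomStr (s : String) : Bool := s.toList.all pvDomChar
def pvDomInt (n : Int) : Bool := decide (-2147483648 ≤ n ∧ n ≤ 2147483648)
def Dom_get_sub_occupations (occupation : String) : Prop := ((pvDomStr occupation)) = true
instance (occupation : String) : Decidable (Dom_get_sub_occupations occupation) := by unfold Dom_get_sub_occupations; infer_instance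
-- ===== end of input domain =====

-- B precomputes (word, lowered) pairs once and builds the result by structural
-- recursion over the suffix list, instead of A's nested foldl loops (objective: alternative).


-- ===== PORT A =====
-- occupation.split(' '): sep is the non-empty literal " ", so split? is always some
def get_sub_occupations (occupation : String) : List String :=
  let professions_suffix : List String := ["er", "or", "ist", "ian", "ant", "man", "ee"]
  let occupation_arr := (PySem.Str.split? occupation " ").getD []
  professions_suffix.foldl (fun new_occupation suffix =>
    occupation_arr.foldl (fun new_occupation sub_occ =>
      if PySem.Str.endswith sub_occ suffix then new_occupation ++ [PySem.Str.lower sub_occ]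
      else new_occupation) new_occupation) []

-- ===== PORT B =====
-- matches(suffix, ps): the lowered components of pairs whose word ends with suffix
def pvMatches (suffix : String) : List (String × String) → List String
  | [] => []
  | (w, low) :: rest =>
      (if PySem.Str.endswith w suffix then [low] else []) ++ pvMatches suffix rest

-- go(ss): concatenate the matches of each suffix in order
def pvGo (pairs : List (String × String)) : List String → List String
  | [] => []
  | s :: ss => pvMatches s pairs ++ pvGo pairs ss

def get_sub_occupations_alt (occupation : String) : List String :=
  let pairs := ((PySem.Str.split? occupation " ").getD []).map
    (fun w => (w, PySem.Str.lower w))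
  pvGo pairs ["er", "or", "ist", "ian", "ant", "man", "ee"]

-- ===== PRECONDITION & SPEC =====
def Spec_get_sub_occupations (occupation : String) (out : List String) : Prop := out = get_sub_occupations_alt occupation
instance (occupation : String) (out : List String) : Decidable (Spec_get_sub_occupations occupation out) := by unfold Spec_get_sub_occupations; infer_instance

-- ===== CLAIM =====
def Claim_equal_get_sub_occupations : Prop := ∀ (occupation : String), Dom_get_sub_occupations occupation → Spec_get_sub_occupations occupation (get_sub_occupations occupation)

-- ===== LEMMAS AND PROOFS =====

-- A's inner loop over words, for one suffix, appends the lowered matching words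
theorem pv_inner_loop (suffix : String) (ws : List String) (acc : List String) :
    ws.foldl (fun acc w =>
      if PySem.Str.endswith w suffix then acc ++ [PySem.Str.lower w] else acc) acc
    = acc ++ (ws.filter (fun w => PySem.Str.endswith w suffix)).map PySem.Str.lower := by
  induction ws generalizing acc with
  | nil => simp
  | cons w ws ih =>
    simp only [List.foldl_cons, List.filter_cons, ih]
    split_ifs <;> simp

-- B's matches on the precomputed pairs equals filter-then-lower on the words
theorem pv_matches_eq (suffix : String) (ws : List String) :
    pvMatches suffix (ws.map (fun w => (w, PySem.Str.lower w)))
    = (ws.filter (fun w => PySem.Str.endswith w suffix)).map PySem.Str.lower := by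
  induction ws with
  | nil => rfl
  | cons w ws ih =>
    simp only [List.map_cons, pvMatches, List.filter_cons, ih]
    split_ifs <;> simp

-- ===== VERDICT =====
theorem get_sub_occupations_spec : Claim_equal_get_sub_occupations := by
  intro occupation _
  unfold Spec_get_sub_occupations get_sub_occupations get_sub_occupations_alt
  simp only [List.foldl_cons, List.foldl_nil, pv_inner_loop, pvGo, pv_matches_eq]
  simp
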